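-- pv_equiv track=rewrite | github.com/CaprisUwU/xsema | core/enterprise_auth.py | _determine_role_from_groups
-- ===== SOURCE A (Python) =====
-- from typing import Optional, Dict, List, Any
-- from enum import Enum
--
-- class UserRole(str, Enum):
--     """User roles for RBAC"""
--     VIEWER = "viewer"
--     USER = "user"
--     ANALYST = "analyst"
--     MANAGER = "manager"
--     ADMIN = "admin"
--     SUPER_ADMIN = "super_admin"
--
-- def _determine_role_from_groups(groups: List[str]) -> UserRole:
--     """Determine user role from LDAP groups"""
--     if not groups:
--         return UserRole.USER
--
--     group_names = [group.lower() for group in groups]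
--
--     if any("admin" in group for group in group_names):
--         return UserRole.ADMIN
--     elif any("manager" in group for group in group_names):
--         return UserRole.MANAGER
--     elif any("analyst" in group for group in group_names):
--         return UserRole.ANALYST
--     else:
--         return UserRole.USER
-- ===== SOURCE B (Python) =====
-- from typing import List
-- from enum import Enum
--
-- class UserRole(str, Enum):
--     """User roles for RBAC"""
--     VIEWER = "viewer"
--     USER = "user"
--     ANALYST = "analyst"
--     MANAGER = "manager"
--     ADMIN = "admin"
--     SUPER_ADMIN = "super_admin"
--
-- _PRIORITY = (("admin", 3, UserRole.ADMIN),
--              ("manager", 2, UserRole.MANAGER),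
--              ("analyst", 1, UserRole.ANALYST))
--
-- def _determine_role_from_groups(groups: List[str]) -> UserRole:
--     """Determine user role from LDAP groups (single pass, best-so-far)."""
--     if not groups:
--         return UserRole.USER
--     best_rank, best_role = 0, UserRole.USER
--     for group in groups:
--         name = group.lower()
--         for kw, rank, role in _PRIORITY:
--             if rank > best_rank and kw in name:
--                 best_rank, best_role = rank, role
--     return best_role
-- ===== Notes on version B (the rewrite author's own statement) =====
-- stated objective: alternative
-- what changed: Replaces A's three separate full scans of the group list (one 'any' per keyword) with a single pass that maintains a best-so-far (rank, role) against a keyword priority table.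
import Mathlib
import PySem

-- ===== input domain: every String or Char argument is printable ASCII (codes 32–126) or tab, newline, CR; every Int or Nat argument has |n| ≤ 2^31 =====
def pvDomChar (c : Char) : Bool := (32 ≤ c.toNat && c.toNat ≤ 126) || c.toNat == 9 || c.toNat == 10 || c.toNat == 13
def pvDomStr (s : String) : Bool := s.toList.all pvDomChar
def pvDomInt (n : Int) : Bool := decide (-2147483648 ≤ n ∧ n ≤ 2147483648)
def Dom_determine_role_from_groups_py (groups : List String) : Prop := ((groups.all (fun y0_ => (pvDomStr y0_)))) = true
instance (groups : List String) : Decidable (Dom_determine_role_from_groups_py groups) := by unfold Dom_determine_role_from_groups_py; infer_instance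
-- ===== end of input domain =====

-- B replaces A's three separate full scans of the list (one 'any' per keyword) with a
-- single pass maintaining a best-so-far (rank, role) against a priority table; alternative, same cost class.

-- ===== PORT A =====
def determine_role_from_groups_py (groups : List String) : String :=
  if groups = [] then "user"
  else
    let group_names := groups.map PySem.Str.lower
    if group_names.any (fun g => PySem.Str.isIn "admin" g) then "admin"
    else if group_names.any (fun g => PySem.Str.isIn "manager" g) then "manager"
    else if group_names.any (fun g => PySem.Str.isIn "analyst" g) then "analyst"
    else "user"

-- ===== PORT B =====
-- the priority table _PRIORITY of Source B: (keyword, rank, role)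
def pvPriority : List (String × Nat × String) :=
  [("admin", 3, "admin"), ("manager", 2, "manager"), ("analyst", 1, "analyst")]

-- body of Source B's outer loop: fold the priority table over the best-so-far state
def pvStep (best : Nat × String) (group : String) : Nat × String :=
  let name := PySem.Str.lower group
  pvPriority.foldl
    (fun b e => if e.2.1 > b.1 && PySem.Str.isIn e.1 name then (e.2.1, e.2.2) else b)
    best

def determine_role_from_groups_py_alt (groups : List String) : String :=
  if groups = [] then "user"
  else (groups.foldl pvStep (0, "user")).2

-- ===== PRECONDITION & SPEC =====
def Spec_determine_role_from_groups_py (groups : List String) (out : String) : Prop := out = determine_role_from_groups_py_alt groups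
instance (groups : List String) (out : String) : Decidable (Spec_determine_role_from_groups_py groups out) := by unfold Spec_determine_role_from_groups_py; infer_instance

-- ===== CLAIM (what is proved, stated in full; the proofs are below) =====
def Claim_equal_determine_role_from_groups_py : Prop := ∀ (groups : List String), Dom_determine_role_from_groups_py groups → Spec_determine_role_from_groups_py groups (determine_role_from_groups_py groups)

-- ===== LEMMAS AND PROOFS =====

-- rank of a single group: which highest-priority keyword it contains
def pvGScore (g : String) : Nat :=
  if PySem.Str.isIn "admin" (PySem.Str.lower g) then 3
  else if PySem.Str.isIn "manager" (PySem.Str.lower g) then 2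
  else if PySem.Str.isIn "analyst" (PySem.Str.lower g) then 1
  else 0

-- role named by a rank (default s for rank 0)
def pvRole (m : Nat) (s : String) : String :=
  if 3 ≤ m then "admin" else if m = 2 then "manager" else if m = 1 then "analyst" else s

-- highest rank occurring in the list
def pvS (gs : List String) : Nat := (gs.map pvGScore).foldr max 0

lemma pvRole_pos (m : Nat) (s t : String) (h : 1 ≤ m) : pvRole m s = pvRole m t := by
  unfold pvRole; split_ifs <;> first | rfl | omega

lemma pvStep_eq (r : Nat) (s : String) (g : String) :
    pvStep (r, s) g =
      (if 3 > r && PySem.Str.isIn "admin" (PySem.Str.lower g) then (3, "admin")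
       else if 2 > r && PySem.Str.isIn "manager" (PySem.Str.lower g) then (2, "manager")
       else if 1 > r && PySem.Str.isIn "analyst" (PySem.Str.lower g) then (1, "analyst")
       else (r, s)) := by
  simp only [pvStep, pvPriority, List.foldl_cons, List.foldl_nil]
  cases hA : PySem.Str.isIn "admin" (PySem.Str.lower g) <;>
  cases hM : PySem.Str.isIn "manager" (PySem.Str.lower g) <;>
  cases hN : PySem.Str.isIn "analyst" (PySem.Str.lower g) <;>
  simp <;> split_ifs <;> simp_all

-- Source B's per-group update is "take the group's rank if it beats the best so far"
lemma pvStep_score (r : Nat) (s : String) (g : String) :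
    pvStep (r, s) g = if r < pvGScore g then (pvGScore g, pvRole (pvGScore g) s) else (r, s) := by
  rw [pvStep_eq]
  unfold pvGScore pvRole
  cases hA : PySem.Str.isIn "admin" (PySem.Str.lower g) <;>
  cases hM : PySem.Str.isIn "manager" (PySem.Str.lower g) <;>
  cases hN : PySem.Str.isIn "analyst" (PySem.Str.lower g) <;>
  simp <;> split_ifs <;> first | rfl | omega

-- the whole fold keeps the best rank seen, with its role
lemma pvFold_state (gs : List String) (r : Nat) (s : String) :
    gs.foldl pvStep (r, s) = if r < pvS gs then (pvS gs, pvRole (pvS gs) s) else (r, s) := by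
  induction gs generalizing r s with
  | nil => simp [pvS]
  | cons g rest ih =>
    have hS : pvS (g :: rest) = max (pvGScore g) (pvS rest) := by
      simp [pvS]
    rw [List.foldl_cons, pvStep_score, hS]
    by_cases h1 : r < pvGScore g
    · rw [if_pos h1, ih]
      by_cases h2 : pvGScore g < pvS rest
      · rw [if_pos h2, if_pos (by omega)]
        have hmx : max (pvGScore g) (pvS rest) = pvS rest := by omega
        rw [hmx, pvRole_pos (pvS rest) (pvRole (pvGScore g) s) s (by omega)]
      · rw [if_neg h2, if_pos (by omega)]
        have hmx : max (pvGScore g) (pvS rest) = pvGScore g := by omega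
        rw [hmx]
    · rw [if_neg h1, ih]
      by_cases h2 : r < pvS rest
      · rw [if_pos h2, if_pos (by omega)]
        have hmx : max (pvGScore g) (pvS rest) = pvS rest := by omega
        rw [hmx]
      · rw [if_neg h2, if_neg (by omega)]

lemma pvGScore_le (g : String) : pvGScore g ≤ 3 := by
  unfold pvGScore; split_ifs <;> omega

lemma pvS_le3 (gs : List String) : pvS gs ≤ 3 := by
  induction gs with
  | nil => simp [pvS]
  | cons g rest ih =>
    have := pvGScore_le g
    simp only [pvS, List.map_cons, List.foldr_cons] at *
    omega

lemma pvGScore_ge3_iff (g : String) :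
    3 ≤ pvGScore g ↔ PySem.Str.isIn "admin" (PySem.Str.lower g) = true := by
  unfold pvGScore; split_ifs <;> simp_all

lemma pvGScore_ge2_iff (g : String) :
    2 ≤ pvGScore g ↔ (PySem.Str.isIn "admin" (PySem.Str.lower g) = true
      ∨ PySem.Str.isIn "manager" (PySem.Str.lower g) = true) := by
  unfold pvGScore; split_ifs <;> simp_all

lemma pvGScore_ge1_iff (g : String) :
    1 ≤ pvGScore g ↔ (PySem.Str.isIn "admin" (PySem.Str.lower g) = true
      ∨ PySem.Str.isIn "manager" (PySem.Str.lower g) = true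
      ∨ PySem.Str.isIn "analyst" (PySem.Str.lower g) = true) := by
  unfold pvGScore; split_ifs <;> simp_all

lemma pvS_ge_iff (gs : List String) (k : Nat) (hk : 1 ≤ k) :
    k ≤ pvS gs ↔ ∃ g ∈ gs, k ≤ pvGScore g := by
  induction gs with
  | nil => simp [pvS]; omega
  | cons g rest ih =>
    simp only [pvS, List.map_cons, List.foldr_cons, le_max_iff, List.mem_cons] at *
    constructor
    · rintro (h | h)
      · exact ⟨g, Or.inl rfl, h⟩
      · obtain ⟨x, hx, hkx⟩ := ih.mp h
        exact ⟨x, Or.inr hx, hkx⟩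
    · rintro ⟨x, hx | hx, hkx⟩
      · exact Or.inl (hx ▸ hkx)
      · exact Or.inr (ih.mpr ⟨x, hx, hkx⟩)

-- ===== VERDICT (by name: the statement is the Claim_ definition above) =====
theorem determine_role_from_groups_py_spec : Claim_equal_determine_role_from_groups_py := by
  intro groups _
  unfold Spec_determine_role_from_groups_py determine_role_from_groups_py determine_role_from_groups_py_alt
  by_cases hne : groups = []
  · simp [hne]
  · rw [if_neg hne, if_neg hne, pvFold_state]
    have hle := pvS_le3 groups
    simp only [List.any_map, Function.comp, List.any_eq_true]
    by_cases hA : ∃ g ∈ groups, PySem.Str.isIn "admin" (PySem.Str.lower g) = true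
    · have h3 : 3 ≤ pvS groups := by
        rw [pvS_ge_iff groups 3 (by omega)]
        obtain ⟨g, hg, h⟩ := hA
        exact ⟨g, hg, (pvGScore_ge3_iff g).mpr h⟩
      rw [if_pos hA, if_pos (by omega)]
      unfold pvRole
      rw [if_pos h3]
    · rw [if_neg hA]
      by_cases hM : ∃ g ∈ groups, PySem.Str.isIn "manager" (PySem.Str.lower g) = true
      · have h2 : 2 ≤ pvS groups := by
          rw [pvS_ge_iff groups 2 (by omega)]
          obtain ⟨g, hg, h⟩ := hM
          exact ⟨g, hg, (pvGScore_ge2_iff g).mpr (Or.inr h)⟩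
        have h3 : ¬ 3 ≤ pvS groups := by
          rw [pvS_ge_iff groups 3 (by omega)]
          rintro ⟨g, hg, h⟩
          exact hA ⟨g, hg, (pvGScore_ge3_iff g).mp h⟩
        rw [if_pos hM, if_pos (by omega)]
        unfold pvRole
        rw [if_neg h3, if_pos (by omega)]
      · rw [if_neg hM]
        by_cases hN : ∃ g ∈ groups, PySem.Str.isIn "analyst" (PySem.Str.lower g) = true
        · have h1 : 1 ≤ pvS groups := by
            rw [pvS_ge_iff groups 1 (by omega)]
            obtain ⟨g, hg, h⟩ := hN
            exact ⟨g, hg, (pvGScore_ge1_iff g).mpr (Or.inr (Or.inr h))⟩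
          have h2 : ¬ 2 ≤ pvS groups := by
            rw [pvS_ge_iff groups 2 (by omega)]
            rintro ⟨g, hg, h⟩
            rcases (pvGScore_ge2_iff g).mp h with h' | h'
            · exact hA ⟨g, hg, h'⟩
            · exact hM ⟨g, hg, h'⟩
          rw [if_pos hN, if_pos (by omega)]
          unfold pvRole
          rw [if_neg (by omega), if_neg (by omega), if_pos (by omega)]
        · have h1 : ¬ 1 ≤ pvS groups := by
            rw [pvS_ge_iff groups 1 (by omega)]
            rintro ⟨g, hg, h⟩
            rcases (pvGScore_ge1_iff g).mp h with h' | h' | h'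
            · exact hA ⟨g, hg, h'⟩
            · exact hM ⟨g, hg, h'⟩
            · exact hN ⟨g, hg, h'⟩
          rw [if_neg hN, if_neg (by omega)]
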